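-- pv_equiv track=rewrite | github.com/inchei/bangumi-wiki-scripts | filter_by_fields.py | check_tag_conditions
-- ===== SOURCE A (Python) =====
-- def check_tag_conditions(data, tag_filters):
--     """检查普通标签条件"""
--     if not tag_filters:
--         return True
--
--     tag_names = [tag['name'] for tag in data.get('tags', [])]
--
--     for tag_name, negate in tag_filters:
--         tag_exists = tag_name in tag_names
--         if (negate and tag_exists) or (not negate and not tag_exists):
--             return False
--
--     return True
-- ===== SOURCE B (Python) =====
-- def check_tag_conditions(data, tag_filters):
--     """检查普通标签条件"""
--     required = set()
--     forbidden = set()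
--     for name, negate in tag_filters:
--         (forbidden if negate else required).add(name)
--     for tag in data.get('tags', []):
--         name = tag['name']
--         if name in forbidden:
--             return False
--         required.discard(name)
--     return not required
-- ===== Notes on version B (the rewrite author's own statement) =====
-- stated objective: alternative
-- what changed: Flips the traversal: instead of A's loop over the filters testing each name's membership in the tag-name list, B partitions the filters into required/forbidden sets once and then scans the data's tags, failing fast on a forbidden tag and consuming matches from the required set, succeeding iff required ends empty.
-- outside the precondition, e.g. on check_tag_conditions({'tags': [{}]}, []): A returns True, B raises KeyError
import Mathlib
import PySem

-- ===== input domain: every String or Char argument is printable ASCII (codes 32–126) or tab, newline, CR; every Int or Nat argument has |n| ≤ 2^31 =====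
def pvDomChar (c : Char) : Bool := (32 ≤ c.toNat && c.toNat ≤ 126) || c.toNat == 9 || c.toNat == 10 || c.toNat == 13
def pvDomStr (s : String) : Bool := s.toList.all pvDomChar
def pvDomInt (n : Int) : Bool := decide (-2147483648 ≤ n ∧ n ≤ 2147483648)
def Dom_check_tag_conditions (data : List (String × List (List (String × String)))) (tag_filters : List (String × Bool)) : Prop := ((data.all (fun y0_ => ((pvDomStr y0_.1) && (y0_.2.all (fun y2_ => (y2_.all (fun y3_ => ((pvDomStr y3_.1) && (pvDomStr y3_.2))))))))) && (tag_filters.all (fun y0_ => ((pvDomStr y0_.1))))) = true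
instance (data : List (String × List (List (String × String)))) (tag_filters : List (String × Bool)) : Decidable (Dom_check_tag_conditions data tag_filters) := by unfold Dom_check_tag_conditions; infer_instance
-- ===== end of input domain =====

-- B flips the traversal: it partitions the filters into required/forbidden sets, then scans the
-- data's tags once (fail-fast on forbidden, consuming from required); alternative decomposition.


-- ===== PORT A =====
-- the for-loop over tag_filters with its early 'return False'
def ctcLoopA (tag_names : List String) : List (String × Bool) → Bool
  | [] => true
  | (tag_name, negate) :: rest =>
    let tag_exists := tag_names.contains tag_name
    if (negate && tag_exists) || (!negate && !tag_exists) then false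
    else ctcLoopA tag_names rest

-- tag['name'] raises KeyError when absent: Pre_ below excludes that; getD "" is exact under Pre_
def check_tag_conditions (data : List (String × List (List (String × String)))) (tag_filters : List (String × Bool)) : Bool :=
  if tag_filters.isEmpty then true
  else
    let tag_names := ((PySem.Dict.mk data).getD "tags" []).map (fun tag => (PySem.Dict.mk tag).getD "name" "")
    ctcLoopA tag_names tag_filters

-- ===== PORT B =====
-- B's second loop: over the data's tags, fail-fast on forbidden, discard from required
def ctcLoopB (forbidden : PySem.Set String) (required : PySem.Set String) :
    List (List (String × String)) → Bool
  | [] => required.isEmpty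
  | tag :: rest =>
    let name := (PySem.Dict.mk tag).getD "name" ""
    if forbidden.contains name then false
    else ctcLoopB forbidden (PySem.Set.discard required name) rest

def check_tag_conditions_alt (data : List (String × List (List (String × String)))) (tag_filters : List (String × Bool)) : Bool :=
  let rf := tag_filters.foldl
    (fun (p : PySem.Set String × PySem.Set String) f =>
      if f.2 then (p.1, PySem.Set.add p.2 f.1) else (PySem.Set.add p.1 f.1, p.2))
    (PySem.Set.empty, PySem.Set.empty)
  ctcLoopB rf.2 rf.1 ((PySem.Dict.mk data).getD "tags" [])

-- ===== PRECONDITION & SPEC =====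
-- Pre_ excludes inputs where some tag dict lacks the key 'name': A raises KeyError there whenever
-- tag_filters is nonempty, and B raises there even for empty tag_filters (where A returns True),
-- since B always scans the tags.
def Pre_check_tag_conditions (data : List (String × List (List (String × String)))) (tag_filters : List (String × Bool)) : Prop :=
  ∀ tag ∈ (PySem.Dict.mk data).getD "tags" [], (PySem.Dict.mk tag).contains "name" = true
instance (data : List (String × List (List (String × String)))) (tag_filters : List (String × Bool)) : Decidable (Pre_check_tag_conditions data tag_filters) := by unfold Pre_check_tag_conditions; infer_instance

def pvWitness_check_tag_conditions : (List (String × List (List (String × String)))) × (List (String × Bool)) :=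
  ([("tags", [[("name", "anime")], [("name", "manga")]])], [("anime", false), ("game", true)])

def Spec_check_tag_conditions (data : List (String × List (List (String × String)))) (tag_filters : List (String × Bool)) (out : Bool) : Prop := out = check_tag_conditions_alt data tag_filters
instance (data : List (String × List (List (String × String)))) (tag_filters : List (String × Bool)) (out : Bool) : Decidable (Spec_check_tag_conditions data tag_filters out) := by unfold Spec_check_tag_conditions; infer_instance

-- ===== CLAIM (what is proved, stated in full; the proofs are below) =====
def Claim_equal_check_tag_conditions : Prop := ∀ (data : List (String × List (List (String × String)))) (tag_filters : List (String × Bool)), Dom_check_tag_conditions data tag_filters → Pre_check_tag_conditions data tag_filters → Spec_check_tag_conditions data tag_filters (check_tag_conditions data tag_filters)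

-- ===== LEMMAS AND PROOFS =====

-- A's loop is the conjunction of the per-filter checks
lemma ctcLoopA_eq_all (tag_names : List String) (fs : List (String × Bool)) :
    ctcLoopA tag_names fs = fs.all (fun f => tag_names.contains f.1 != f.2) := by
  induction fs with
  | nil => rfl
  | cons f rest ih =>
    obtain ⟨n, neg⟩ := f
    simp only [ctcLoopA, List.all_cons, ih]
    cases h : tag_names.contains n <;> cases neg <;> simp

-- membership in the partition fold's two sets
lemma mem_partition (fs : List (String × Bool)) :
    ∀ (r f : PySem.Set String) (x : String),
      (x ∈ (fs.foldl (fun (p : PySem.Set String × PySem.Set String) g =>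
          if g.2 then (p.1, PySem.Set.add p.2 g.1) else (PySem.Set.add p.1 g.1, p.2)) (r, f)).1
        ↔ x ∈ r ∨ (x, false) ∈ fs) ∧
      (x ∈ (fs.foldl (fun (p : PySem.Set String × PySem.Set String) g =>
          if g.2 then (p.1, PySem.Set.add p.2 g.1) else (PySem.Set.add p.1 g.1, p.2)) (r, f)).2
        ↔ x ∈ f ∨ (x, true) ∈ fs) := by
  induction fs with
  | nil => intro r f x; simp
  | cons g rest ih =>
    intro r f x
    obtain ⟨n, neg⟩ := g
    cases neg
    · simpa [(ih (PySem.Set.add r n) f x).1, (ih (PySem.Set.add r n) f x).2,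
        PySem.Set.mem_add, Prod.ext_iff] using by tauto
    · simpa [(ih r (PySem.Set.add f n) x).1, (ih r (PySem.Set.add f n) x).2,
        PySem.Set.mem_add, Prod.ext_iff] using by tauto

-- B's tag scan succeeds iff required ⊆ names and forbidden ∩ names = ∅
lemma ctcLoopB_iff (forb : PySem.Set String) (tags : List (List (String × String))) :
    ∀ req : PySem.Set String,
      ctcLoopB forb req tags = true ↔
        ((∀ x ∈ req, x ∈ tags.map (fun tag => (PySem.Dict.mk tag).getD "name" "")) ∧
         (∀ n ∈ tags.map (fun tag => (PySem.Dict.mk tag).getD "name" ""), n ∉ forb)) := by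
  induction tags with
  | nil =>
    intro req
    simp [ctcLoopB, List.isEmpty_iff, List.eq_nil_iff_forall_not_mem]
  | cons tag rest ih =>
    intro req
    simp only [ctcLoopB, List.map_cons, List.mem_cons]
    by_cases h : ((PySem.Dict.mk tag).getD "name" "") ∈ forb
    · have hc : forb.contains ((PySem.Dict.mk tag).getD "name" "") = true := by
        rw [PySem.Set.contains_iff]; exact h
      rw [hc, if_pos rfl]
      constructor
      · intro hf; exact absurd hf (by simp)
      · rintro ⟨-, h2⟩
        exact absurd (h2 _ (Or.inl rfl)) (by simpa [PySem.Set.contains_iff] using h)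
    · have hc : forb.contains ((PySem.Dict.mk tag).getD "name" "") = false := by
        simpa [Bool.eq_false_iff, Ne, PySem.Set.contains_iff] using h
      simp only [hc, Bool.false_eq_true, if_false, ih]
      constructor
      · rintro ⟨h1, h2⟩
        refine ⟨fun x hx => ?_, fun n hn => ?_⟩
        · by_cases hx' : x = (PySem.Dict.mk tag).getD "name" ""
          · exact Or.inl hx'
          · exact Or.inr (h1 x (by simp [PySem.Set.mem_discard, hx, hx']))
        · rcases hn with hn | hn
          · exact hn ▸ h
          · exact h2 n hn
      · rintro ⟨h1, h2⟩
        refine ⟨fun x hx => ?_, fun n hn => h2 n (Or.inr hn)⟩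
        rw [PySem.Set.mem_discard] at hx
        rcases h1 x hx.1 with h | h
        · exact absurd h hx.2
        · exact h

-- ===== VERDICT (by name: the statement is the Claim_ definition above) =====
theorem check_tag_conditions_spec : Claim_equal_check_tag_conditions := by
  intro data tag_filters _ _
  unfold Spec_check_tag_conditions check_tag_conditions check_tag_conditions_alt
  rw [Bool.eq_iff_iff]
  set tags := (PySem.Dict.mk data).getD "tags" [] with htags
  set names := tags.map (fun tag => (PySem.Dict.mk tag).getD "name" "") with hnames
  have hB := ctcLoopB_iff
    ((tag_filters.foldl (fun (p : PySem.Set String × PySem.Set String) g =>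
        if g.2 then (p.1, PySem.Set.add p.2 g.1) else (PySem.Set.add p.1 g.1, p.2))
      (PySem.Set.empty, PySem.Set.empty)).2) tags
    ((tag_filters.foldl (fun (p : PySem.Set String × PySem.Set String) g =>
        if g.2 then (p.1, PySem.Set.add p.2 g.1) else (PySem.Set.add p.1 g.1, p.2))
      (PySem.Set.empty, PySem.Set.empty)).1)
  simp only [hB]
  have hmem := fun x => mem_partition tag_filters PySem.Set.empty PySem.Set.empty x
  simp only [PySem.Set.empty, List.not_mem_nil, false_or] at hmem
  by_cases hemp : tag_filters = []
  · subst hemp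
    simp only [List.isEmpty_nil, if_true, true_iff, List.foldl_nil]
    exact ⟨fun x hx => absurd hx (by simp [PySem.Set.empty]),
           fun n hn hx => absurd hx (by simp [PySem.Set.empty])⟩
  · rw [if_neg (by simpa [List.isEmpty_iff] using hemp)]
    rw [ctcLoopA_eq_all]
    simp only [List.all_eq_true]
    constructor
    · intro hA
      refine ⟨fun x hx => ?_, fun n hn hx => ?_⟩
      · have hx' := hA (x, false) ((hmem x).1.mp hx)
        simp only [bne_iff_ne, Ne, Bool.not_eq_false, List.contains_iff_mem] at hx'
        exact hx'
      · have hn' := hA (n, true) ((hmem n).2.mp hx)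
        simp only [bne_iff_ne, Ne, List.contains_iff_mem] at hn'
        exact hn' hn
    · rintro ⟨h1, h2⟩ ⟨n, neg⟩ hf
      cases neg
      · simp only [bne_iff_ne, Ne, Bool.not_eq_false, List.contains_iff_mem]
        exact h1 n ((hmem n).1.mpr hf)
      · simp only [bne_iff_ne, Ne, List.contains_iff_mem]
        intro hn
        exact h2 n hn ((hmem n).2.mpr hf)
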